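-- pv_equiv track=rewrite | github.com/visiontrail/SmartHRBI | apps/api/table_catalog.py | _normalize_column_list
-- ===== SOURCE A (Python) =====
-- def _normalize_column_list(values: list[str]) -> list[str]:
--     normalized: list[str] = []
--     for value in values:
--         trimmed = value.strip()
--         if not trimmed:
--             continue
--         lowered = trimmed.lower()
--         if lowered not in normalized:
--             normalized.append(lowered)
--     return normalized
-- ===== SOURCE B (Python) =====
-- def _normalize_column_list(values: list[str]) -> list[str]:
--     # phase 1: normalize (strip, drop empties, lowercase)
--     rest = [v.strip().lower() for v in values if v.strip()]
--     # phase 2: dedup by repeated filtering: take the head, drop every copy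
--     # of it from the remainder (no membership test against the output)
--     out: list[str] = []
--     while rest:
--         head = rest[0]
--         out.append(head)
--         rest = [y for y in rest[1:] if y != head]
--     return out
-- ===== Notes on version B (the rewrite author's own statement) =====
-- stated objective: alternative
-- what changed: Replaces the single pass with a membership test against the growing output by two phases: normalize everything first, then deduplicate by repeatedly taking the head and filtering all its copies out of the remaining list (selection-style nub), so no membership check against the output is ever made.
import Mathlib
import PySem

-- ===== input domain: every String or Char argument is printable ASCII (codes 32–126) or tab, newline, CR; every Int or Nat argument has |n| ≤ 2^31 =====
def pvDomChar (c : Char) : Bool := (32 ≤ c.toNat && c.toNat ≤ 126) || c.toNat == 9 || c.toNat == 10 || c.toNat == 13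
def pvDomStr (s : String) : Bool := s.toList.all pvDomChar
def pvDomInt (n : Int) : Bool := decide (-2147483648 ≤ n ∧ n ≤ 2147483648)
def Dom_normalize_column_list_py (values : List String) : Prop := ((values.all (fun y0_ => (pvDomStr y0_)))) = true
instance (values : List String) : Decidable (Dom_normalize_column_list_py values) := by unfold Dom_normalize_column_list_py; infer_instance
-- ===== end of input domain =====

-- B keeps A's normalization but deduplicates differently: instead of one pass testing
-- membership in the growing output, it normalizes first and then repeatedly takes the
-- head and filters all its copies out of the remainder (selection-style nub); alternative, same values.


-- ===== PORT A =====
def normalize_column_list_py (values : List String) : List String :=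
  values.foldl
    (fun normalized value =>
      let trimmed := PySem.Str.strip value
      if trimmed = "" then normalized
      else
        let lowered := PySem.Str.lower trimmed
        if lowered ∈ normalized then normalized
        else normalized ++ [lowered])
    []

-- ===== PORT B =====
-- the while loop: append the head to out, filter its copies out of the tail
def nubLoop (out rest : List String) : List String :=
  match rest with
  | [] => out
  | head :: tl => nubLoop (out ++ [head]) (tl.filter (fun y => y ≠ head))
termination_by rest.length
decreasing_by
  simp only [List.length_cons, List.length_unattach]
  exact Nat.lt_succ_of_le (le_of_le_of_eq (List.length_filter_le _ _) List.length_attach)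

def normalize_column_list_py_alt (values : List String) : List String :=
  nubLoop []
    (values.filterMap (fun v =>
      let t := PySem.Str.strip v
      if t = "" then none else some (PySem.Str.lower t)))

-- ===== PRECONDITION & SPEC =====
def Spec_normalize_column_list_py (values : List String) (out : List String) : Prop := out = normalize_column_list_py_alt values
instance (values : List String) (out : List String) : Decidable (Spec_normalize_column_list_py values out) := by unfold Spec_normalize_column_list_py; infer_instance

-- ===== CLAIM (what is proved, stated in full; the proofs are below) =====
def Claim_equal_normalize_column_list_py : Prop := ∀ (values : List String), Dom_normalize_column_list_py values → Spec_normalize_column_list_py values (normalize_column_list_py values)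

-- ===== LEMMAS AND PROOFS =====

-- A's loop body on an accumulator is Set.add of the normalized value (or a skip), so the whole
-- loop is a foldl of Set.add over the filterMap-ed stream.
theorem normalize_foldl_eq (values : List String) (acc : List String) :
    values.foldl
      (fun normalized value =>
        let trimmed := PySem.Str.strip value
        if trimmed = "" then normalized
        else
          let lowered := PySem.Str.lower trimmed
          if lowered ∈ normalized then normalized
          else normalized ++ [lowered])
      acc
    = (values.filterMap (fun v =>
        let t := PySem.Str.strip v
        if t = "" then none else some (PySem.Str.lower t))).foldl PySem.Set.add acc := by
  induction values generalizing acc with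
  | nil => rfl
  | cons v vs ih =>
    simp only [List.foldl_cons, List.filterMap_cons]
    by_cases h : PySem.Str.strip v = ""
    · simp [h, ih]
    · have hstep :
        (if PySem.Str.lower (PySem.Str.strip v) ∈ acc then acc
         else acc ++ [PySem.Str.lower (PySem.Str.strip v)])
          = PySem.Set.add acc (PySem.Str.lower (PySem.Str.strip v)) := by
        simp [PySem.Set.add, PySem.Set.contains]
      simp only [h, ite_false, hstep, List.foldl_cons, ih]

-- adding an element already in the accumulator is a no-op, so copies of it
-- can be filtered out of the stream without changing the fold
theorem foldl_add_filter_ne (a : String) (xs : List String) :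
    ∀ acc : List String, a ∈ acc →
      xs.foldl PySem.Set.add acc = (xs.filter (fun y => y ≠ a)).foldl PySem.Set.add acc := by
  induction xs with
  | nil => intro acc _; rfl
  | cons x xs ih =>
    intro acc ha
    by_cases hx : x = a
    · subst hx
      have : PySem.Set.add acc x = acc := by
        simp [PySem.Set.add, PySem.Set.contains, ha]
      simp [this, ih acc ha]
    · have ha' : a ∈ PySem.Set.add acc x := by
        simp [PySem.Set.add, PySem.Set.contains]
        split_ifs <;> simp [ha]
      simp [hx, ih _ ha']

-- the Set.add fold equals the filtering nub loop whenever the remaining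
-- stream is disjoint from the accumulator (induction on a length bound)
theorem foldl_add_eq_nubLoop :
    ∀ (n : Nat) (rest out : List String), rest.length ≤ n → (∀ y ∈ rest, y ∉ out) →
      rest.foldl PySem.Set.add out = nubLoop out rest := by
  intro n
  induction n with
  | zero =>
    intro rest out hle _
    have : rest = [] := List.eq_nil_of_length_eq_zero (Nat.le_zero.mp hle)
    subst this
    rw [nubLoop.eq_def]
    rfl
  | succ n ih =>
    intro rest out hle hdisj
    cases rest with
    | nil => rw [nubLoop.eq_def]; rfl
    | cons head tl =>
      have hh : head ∉ out := hdisj head (by simp)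
      have hstep : PySem.Set.add out head = out ++ [head] := by
        simp [PySem.Set.add, PySem.Set.contains, hh]
      rw [List.foldl_cons, hstep,
          foldl_add_filter_ne head tl (out ++ [head]) (by simp),
          ih _ _ (le_trans (List.length_filter_le _ _) (Nat.le_of_succ_le_succ hle)) ?_]
      · conv_rhs => rw [nubLoop.eq_def]
      · intro y hy
        simp only [List.mem_filter, decide_eq_true_eq] at hy
        simp only [List.mem_append, List.mem_singleton]
        rintro (hyo | rfl)
        · exact hdisj y (List.mem_cons_of_mem _ hy.1) hyo
        · exact hy.2 rfl

-- ===== VERDICT (by name: the statement is the Claim_ definition above) =====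
theorem normalize_column_list_py_spec : Claim_equal_normalize_column_list_py := by
  intro values _
  unfold Spec_normalize_column_list_py normalize_column_list_py normalize_column_list_py_alt
  rw [normalize_foldl_eq, foldl_add_eq_nubLoop _ _ _ le_rfl (by simp)]
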